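-- pv_equiv track=rewrite | github.com/lucasisnotcool/cs3263-repo | value/create_electronics_splits.py | _flatten_mapping_text
-- ===== SOURCE A (Python) =====
-- from typing import Any
--
-- def _flatten_mapping_text(value: Any) -> str:
--     if not isinstance(value, dict):
--         return ""
--     parts: list[str] = []
--     for key, inner in value.items():
--         key_text = _safe_text(key)
--         inner_text = _safe_text(inner)
--         if key_text or inner_text:
--             parts.append(f"{key_text} {inner_text}".strip())
--     return " ".join(parts).strip()
--
-- def _safe_text(value: Any) -> str:
--     if value is None:
--         return ""
--     return str(value).strip()
-- ===== SOURCE B (Python) =====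
-- def _flatten_mapping_text(value):
--     if not isinstance(value, dict):
--         return ""
--     out = ""
--     for key, inner in reversed(list(value.items())):
--         out = _prepend(_safe_text(inner), out)
--         out = _prepend(_safe_text(key), out)
--     return out
--
-- def _prepend(tok, out):
--     if not tok:
--         return out
--     if not out:
--         return tok
--     return tok + " " + out
--
-- def _safe_text(value):
--     if value is None:
--         return ""
--     return str(value).strip()
-- ===== Notes on version B (the rewrite author's own statement) =====
-- stated objective: alternative
-- what changed: B builds the output string back-to-front: it walks the items in reverse and prepends each nonempty stripped token (value, then key) directly onto the accumulated suffix string, so A's parts list, per-item composite f-string with its or-guard, ' '.join and final strip all disappear.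
import Mathlib
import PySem

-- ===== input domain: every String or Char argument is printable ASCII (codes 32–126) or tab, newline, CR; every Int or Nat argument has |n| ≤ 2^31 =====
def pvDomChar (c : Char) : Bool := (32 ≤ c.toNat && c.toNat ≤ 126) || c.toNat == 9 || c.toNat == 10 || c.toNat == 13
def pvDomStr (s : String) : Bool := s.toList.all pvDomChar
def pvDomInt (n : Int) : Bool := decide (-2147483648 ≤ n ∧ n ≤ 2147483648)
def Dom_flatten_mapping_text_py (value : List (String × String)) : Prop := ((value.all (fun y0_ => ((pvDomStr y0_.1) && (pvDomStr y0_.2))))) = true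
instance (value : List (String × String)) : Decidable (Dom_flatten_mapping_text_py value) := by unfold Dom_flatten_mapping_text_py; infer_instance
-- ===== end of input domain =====

-- B builds the output back-to-front, prepending each nonempty stripped token directly onto the
-- accumulated suffix string (no parts list, per-item composite, join or final strip); objective: alternative.

-- ===== PORT A =====
-- _safe_text on a str argument (never None here) is str.strip
def flatten_mapping_text_py (value : List (String × String)) : String :=
  let parts : List String := value.foldl (fun parts kv =>
      let key_text := PySem.Str.strip kv.1
      let inner_text := PySem.Str.strip kv.2
      if key_text != "" || inner_text != "" then
        parts ++ [PySem.Str.strip (key_text ++ " " ++ inner_text)]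
      else parts) []
  PySem.Str.strip (PySem.Str.join " " parts)

-- ===== PORT B =====
-- _prepend from Source B
def pvPrepend (tok out : String) : String :=
  if tok = "" then out
  else if out = "" then tok
  else tok ++ " " ++ out

-- the 'for … in reversed(list(value.items()))' loop: a foldl over the reversed list
def flatten_mapping_text_py_alt (value : List (String × String)) : String :=
  value.reverse.foldl (fun out kv =>
    pvPrepend (PySem.Str.strip kv.1) (pvPrepend (PySem.Str.strip kv.2) out)) ""

-- ===== PRECONDITION & SPEC =====
def Spec_flatten_mapping_text_py (value : List (String × String)) (out : String) : Prop := out = flatten_mapping_text_py_alt value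
instance (value : List (String × String)) (out : String) : Decidable (Spec_flatten_mapping_text_py value out) := by unfold Spec_flatten_mapping_text_py; infer_instance

-- ===== CLAIM (what is proved, stated in full; the proofs are below) =====
def Claim_equal_flatten_mapping_text_py : Prop := ∀ (value : List (String × String)), Dom_flatten_mapping_text_py value → Spec_flatten_mapping_text_py value (flatten_mapping_text_py value)

-- ===== LEMMAS AND PROOFS =====

-- "this list does not start with a whitespace character"
def pvHeadOk (l : List Char) : Prop := ∀ a, l.head? = some a → PySem.Chars.isspace a = false
-- "this list does not end with a whitespace character"
def pvLastOk (l : List Char) : Prop := pvHeadOk l.reverse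

theorem pv_dropWhile_head (p : Char → Bool) (l : List Char) :
    ∀ a, (l.dropWhile p).head? = some a → p a = false := by
  induction l with
  | nil => intro a h; simp at h
  | cons b t ih =>
    intro a h
    rw [List.dropWhile_cons] at h
    split at h
    · exact ih a h
    · simp_all

theorem pv_prefix_head? {l t : List Char} (h : l <+: t) (hn : l ≠ []) : l.head? = t.head? := by
  obtain ⟨u, rfl⟩ := h
  cases l with
  | nil => exact absurd rfl hn
  | cons a s => simp

theorem pv_rstrip_prefix (w : List Char) : PySem.Chars.rstrip w <+: w := by
  simpa [PySem.Chars.rstrip, ← List.reverse_suffix] using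
    List.dropWhile_suffix (l := w.reverse) PySem.Chars.isspace

theorem pv_headOk_lstrip (s : List Char) : pvHeadOk (PySem.Chars.lstrip s) := by
  intro a h
  exact pv_dropWhile_head _ s a h

theorem pv_headOk_strip (s : List Char) : pvHeadOk (PySem.Chars.strip s) := by
  intro a h
  have hne : PySem.Chars.strip s ≠ [] := by intro hnil; rw [hnil] at h; simp at h
  have hpre : PySem.Chars.strip s <+: PySem.Chars.lstrip s :=
    pv_rstrip_prefix (PySem.Chars.lstrip s)
  have := pv_prefix_head? hpre hne
  exact pv_headOk_lstrip s a (this ▸ h)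

theorem pv_lastOk_strip (s : List Char) : pvLastOk (PySem.Chars.strip s) := by
  intro a h
  rw [PySem.Chars.strip, PySem.Chars.rstrip, List.reverse_reverse] at h
  exact pv_dropWhile_head _ _ a h

theorem pv_lstrip_append {l : List Char} (hne : l ≠ []) (hh : pvHeadOk l) (x : List Char) :
    PySem.Chars.lstrip (l ++ x) = l ++ x := by
  cases l with
  | nil => exact absurd rfl hne
  | cons a t =>
    have ha : PySem.Chars.isspace a = false := hh a rfl
    simp [PySem.Chars.lstrip, ha]

theorem pv_lstrip_of {l : List Char} (hh : pvHeadOk l) : PySem.Chars.lstrip l = l := by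
  cases l with
  | nil => rfl
  | cons a t =>
    have ha : PySem.Chars.isspace a = false := hh a rfl
    simp [PySem.Chars.lstrip, ha]

theorem pv_rstrip_append {l : List Char} (hne : l ≠ []) (hl : pvLastOk l) (x : List Char) :
    PySem.Chars.rstrip (x ++ l) = x ++ l := by
  have h1 : PySem.Chars.lstrip (l.reverse ++ x.reverse) = l.reverse ++ x.reverse :=
    pv_lstrip_append (by simpa using hne) hl x.reverse
  rw [PySem.Chars.lstrip] at h1
  rw [PySem.Chars.rstrip, List.reverse_append, h1]
  simp

theorem pv_rstrip_of {l : List Char} (hl : pvLastOk l) : PySem.Chars.rstrip l = l := by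
  by_cases hn : l = []
  · simp [hn, PySem.Chars.rstrip]
  · simpa using pv_rstrip_append hn hl []

theorem pv_strip_of {l : List Char} (hh : pvHeadOk l) (hl : pvLastOk l) :
    PySem.Chars.strip l = l := by
  rw [PySem.Chars.strip, pv_lstrip_of hh, pv_rstrip_of hl]

theorem pv_join_cons (sep a : List Char) (r : List (List Char)) :
    PySem.Chars.join sep (a :: r) =
      if r = [] then a else a ++ sep ++ PySem.Chars.join sep r := by
  cases r with
  | nil => simp [PySem.Chars.join_singleton]
  | cons b r' => simp [PySem.Chars.join_cons_cons]

theorem pv_join_ne_nil (sep b : List Char) (r : List (List Char)) (hb : b ≠ []) :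
    PySem.Chars.join sep (b :: r) ≠ [] := by
  rw [pv_join_cons]
  split <;> simp [hb]

theorem pv_join_append (sep : List Char) (ts us : List (List Char))
    (h1 : ts ≠ []) (h2 : us ≠ []) :
    PySem.Chars.join sep (ts ++ us) =
      PySem.Chars.join sep ts ++ sep ++ PySem.Chars.join sep us := by
  induction ts with
  | nil => exact absurd rfl h1
  | cons a ts' ih =>
    by_cases hts : ts' = []
    · subst hts
      cases us with
      | nil => exact absurd rfl h2
      | cons u us' => simp [PySem.Chars.join_cons_cons, PySem.Chars.join_singleton]
    · have hne : ts' ++ us ≠ [] := by simp [hts]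
      rw [List.cons_append, pv_join_cons sep a (ts' ++ us), if_neg hne,
        ih hts, pv_join_cons sep a ts', if_neg hts]
      simp [List.append_assoc]

theorem pv_headOk_append {l : List Char} (hne : l ≠ []) (hh : pvHeadOk l) (x : List Char) :
    pvHeadOk (l ++ x) := by
  cases l with
  | nil => exact absurd rfl hne
  | cons a t => intro c hc; simp at hc; exact hc ▸ hh a rfl

theorem pv_lastOk_append {l : List Char} (hne : l ≠ []) (hl : pvLastOk l) (x : List Char) :
    pvLastOk (x ++ l) := by
  unfold pvLastOk
  rw [List.reverse_append]
  exact pv_headOk_append (by simpa using hne) hl _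

theorem pv_join_props (sep : List Char) (parts : List (List Char))
    (h : ∀ p ∈ parts, p ≠ [] ∧ pvHeadOk p ∧ pvLastOk p) :
    pvHeadOk (PySem.Chars.join sep parts) ∧ pvLastOk (PySem.Chars.join sep parts) := by
  induction parts with
  | nil => exact ⟨by intro a h; simp [PySem.Chars.join_nil] at h,
                 by intro a h; simp [PySem.Chars.join_nil] at h⟩
  | cons a rest ih =>
    obtain ⟨hane, hah, hal⟩ := h a (by simp)
    cases hr : rest with
    | nil => rw [pv_join_cons, if_pos rfl]; exact ⟨hah, hal⟩
    | cons b r =>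
      have ih' := ih (fun p hp => h p (by simp [hp]))
      rw [hr] at ih'
      have hbne : b ≠ [] := (h b (by simp [hr])).1
      have hjne : PySem.Chars.join sep (b :: r) ≠ [] := pv_join_ne_nil sep b r hbne
      rw [pv_join_cons, if_neg (by simp)]
      constructor
      · rw [List.append_assoc]
        exact pv_headOk_append hane hah _
      · exact pv_lastOk_append hjne ih'.2 _

theorem pv_strip_join (sep : List Char) (parts : List (List Char))
    (h : ∀ p ∈ parts, p ≠ [] ∧ pvHeadOk p ∧ pvLastOk p) :
    PySem.Chars.strip (PySem.Chars.join sep parts) = PySem.Chars.join sep parts := by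
  obtain ⟨h1, h2⟩ := pv_join_props sep parts h
  exact pv_strip_of h1 h2

theorem pv_join_filter_flatten (sep : List Char) (tss : List (List (List Char))) :
    PySem.Chars.join sep ((tss.filter (fun ts => decide (ts ≠ []))).map (PySem.Chars.join sep)) =
      PySem.Chars.join sep tss.flatten := by
  induction tss with
  | nil => rfl
  | cons ts rest ih =>
    by_cases hts : ts = []
    · simpa [hts] using ih
    · rw [List.flatten_cons, List.filter_cons, if_pos (by simpa using hts), List.map_cons]
      by_cases hL : rest.filter (fun ts => decide (ts ≠ [])) = []
      · have hall : ∀ a ∈ rest, a = [] := by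
          intro a ha
          have := List.filter_eq_nil_iff.mp hL a ha
          simpa using this
        have hfl : rest.flatten = [] := List.flatten_eq_nil_iff.mpr hall
        rw [hL, hfl, List.map_nil, PySem.Chars.join_singleton, List.append_nil]
      · have hfl : rest.flatten ≠ [] := by
          intro hnil
          obtain ⟨a, ha, hane⟩ : ∃ a ∈ rest, a ≠ [] := by
            cases he : rest.filter (fun ts => decide (ts ≠ [])) with
            | nil => exact absurd he hL
            | cons c cs =>
              have hc : c ∈ rest.filter (fun ts => decide (ts ≠ [])) := by rw [he]; simp
              have := List.mem_filter.mp hc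
              exact ⟨c, this.1, by simpa using this.2⟩
          exact hane (List.flatten_eq_nil_iff.mp hnil a ha)
        have hmapne : (rest.filter (fun ts => decide (ts ≠ []))).map (PySem.Chars.join sep) ≠ [] := by
          simpa using hL
        rw [pv_join_cons sep _ _, if_neg hmapne, ih,
          pv_join_append sep ts rest.flatten hts hfl]

-- the per-item fact: strip(k' + " " + v') is the join of the nonempty tokens among k', v'
theorem pv_item (k v : List Char)
    (h : ¬(PySem.Chars.strip k = [] ∧ PySem.Chars.strip v = [])) :
    PySem.Chars.strip ((PySem.Chars.strip k ++ [' ']) ++ PySem.Chars.strip v) =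
      PySem.Chars.join [' ']
        ([PySem.Chars.strip k, PySem.Chars.strip v].filter (fun t => decide (t ≠ []))) := by
  by_cases hk : PySem.Chars.strip k = []
  · have hv : PySem.Chars.strip v ≠ [] := fun hv => h ⟨hk, hv⟩
    rw [hk, List.nil_append, List.filter_cons, if_neg (by simp), List.filter_cons,
      if_pos (by simpa using hv), List.filter_nil, PySem.Chars.join_singleton]
    rw [PySem.Chars.strip, PySem.Chars.lstrip, List.singleton_append, List.dropWhile_cons,
      if_pos (by decide)]
    have : List.dropWhile PySem.Chars.isspace (PySem.Chars.strip v) = PySem.Chars.strip v :=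
      pv_lstrip_of (pv_headOk_strip v)
    rw [this]
    exact pv_rstrip_of (pv_lastOk_strip v)
  · by_cases hv : PySem.Chars.strip v = []
    · rw [hv, List.append_nil, List.filter_cons, if_pos (by simpa using hk), List.filter_cons,
        if_neg (by simp), List.filter_nil, PySem.Chars.join_singleton]
      rw [PySem.Chars.strip, pv_lstrip_append hk (pv_headOk_strip k) [' ']]
      rw [PySem.Chars.rstrip, List.reverse_append]
      simp only [List.reverse_singleton, List.singleton_append, List.dropWhile_cons,
        if_pos (by decide : PySem.Chars.isspace ' ' = true)]
      have : List.dropWhile PySem.Chars.isspace (PySem.Chars.strip k).reverse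
          = (PySem.Chars.strip k).reverse := pv_lstrip_of (pv_lastOk_strip k)
      rw [this, List.reverse_reverse]
    · rw [List.filter_cons, if_pos (by simpa using hk), List.filter_cons,
        if_pos (by simpa using hv), List.filter_nil, PySem.Chars.join_cons_cons,
        PySem.Chars.join_singleton]
      rw [PySem.Chars.strip,
        pv_lstrip_append (l := PySem.Chars.strip k ++ [' ']) (by simp) (pv_headOk_append hk (pv_headOk_strip k) _) _,
        pv_rstrip_append hv (pv_lastOk_strip v) _]

-- the char-level tokens of one item
def pvCtok (kv : String × String) : List (List Char) :=
  [PySem.Chars.strip kv.1.toList, PySem.Chars.strip kv.2.toList].filter (fun t => decide (t ≠ []))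

theorem pv_bne_empty (s : String) : (s != "") = decide (s.toList ≠ []) := by
  by_cases h : s = "" <;> simp [h, String.toList_eq_nil_iff, bne]

-- B's back-to-front accumulation over a flat token list computes the ' '-join of the
-- nonempty stripped tokens
theorem pv_foldr_join (ts : List String) :
    (ts.foldr (fun t out => pvPrepend (PySem.Str.strip t) out) "").toList
      = PySem.Chars.join [' ']
          ((ts.map (fun t => PySem.Chars.strip t.toList)).filter (fun cs => decide (cs ≠ []))) := by
  induction ts with
  | nil => rfl
  | cons t rest ih =>
    have hstripL : (PySem.Str.strip t).toList = PySem.Chars.strip t.toList :=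
      PySem.Str.toList_strip t
    have hstrip0 : (PySem.Str.strip t = "") ↔ PySem.Chars.strip t.toList = [] := by
      rw [← hstripL, ← String.toList_eq_nil_iff]
    set S := rest.foldr (fun t out => pvPrepend (PySem.Str.strip t) out) "" with hS
    set L := (rest.map (fun t => PySem.Chars.strip t.toList)).filter
        (fun cs => decide (cs ≠ [])) with hL
    have hSL : S.toList = PySem.Chars.join [' '] L := ih
    have hS0 : S = "" ↔ L = [] := by
      constructor
      · intro h
        cases hc : L with
        | nil => rfl
        | cons c cs =>
          have hcne : c ≠ [] := by
            have hcmem : c ∈ L := by rw [hc]; simp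
            simpa using (List.mem_filter.mp hcmem).2
          have : S.toList ≠ [] := by rw [hSL, hc]; exact pv_join_ne_nil _ c cs hcne
          exact absurd (by rw [h]; rfl) this
      · intro h
        have : S.toList = [] := by rw [hSL, h]; rfl
        exact String.toList_eq_nil_iff.mp this
    simp only [List.foldr_cons, List.map_cons, List.filter_cons, ← hS, ← hL]
    unfold pvPrepend
    split_ifs with h1 h2 h3 h4 h5
    · exact absurd (hstrip0.mp h1) (by simpa using h2)
    · exact hSL
    · rw [pv_join_cons, if_pos (hS0.mp h3), hstripL]
    · exact absurd (fun h => h1 (hstrip0.mpr h)) (by simpa using h4)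
    · rw [pv_join_cons, if_neg (fun h => h3 (hS0.mpr h))]
      simp [hstripL, hSL]
    · exact absurd (fun h => h1 (hstrip0.mpr h)) (by simpa using h5)

-- the pairwise loop body equals a token-wise foldr over the flattened token stream
theorem pv_pairs_foldr (value : List (String × String)) :
    value.foldr (fun kv out =>
        pvPrepend (PySem.Str.strip kv.1) (pvPrepend (PySem.Str.strip kv.2) out)) ""
      = (value.flatMap (fun kv => [kv.1, kv.2])).foldr
          (fun t out => pvPrepend (PySem.Str.strip t) out) "" := by
  induction value with
  | nil => rfl
  | cons kv rest ih => simp [List.flatMap_cons, ih]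

-- the flattened per-item token lists are the filtered stripped flat token stream
theorem pv_flatten_ctok (value : List (String × String)) :
    (value.map pvCtok).flatten
      = ((value.flatMap (fun kv => [kv.1, kv.2])).map
          (fun t => PySem.Chars.strip t.toList)).filter (fun cs => decide (cs ≠ [])) := by
  induction value with
  | nil => rfl
  | cons kv rest ih =>
    simp only [List.map_cons, List.flatten_cons, List.flatMap_cons, List.cons_append,
      List.filter_cons, ih, pvCtok,
      List.filter_nil]
    split_ifs <;> simp

-- ===== VERDICT (by name: the statement is the Claim_ definition above) =====
theorem flatten_mapping_text_py_spec : Claim_equal_flatten_mapping_text_py := by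
  intro value _
  unfold Spec_flatten_mapping_text_py flatten_mapping_text_py flatten_mapping_text_py_alt
  rw [PySem.List.foldl_append_if
      (p := fun kv : String × String => PySem.Str.strip kv.1 != "" || PySem.Str.strip kv.2 != "")
      (f := fun kv : String × String =>
        PySem.Str.strip (PySem.Str.strip kv.1 ++ " " ++ PySem.Str.strip kv.2))]
  rw [List.nil_append]
  rw [List.foldl_reverse]
  apply String.toList_inj.mp
  rw [PySem.Str.toList_strip, PySem.Str.toList_join]
  -- B side
  rw [pv_pairs_foldr, pv_foldr_join, ← pv_flatten_ctok]
  -- A side: the per-item composite parts are joins of the per-item token lists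
  have hA : (List.map (fun kv : String × String =>
        PySem.Str.strip (PySem.Str.strip kv.1 ++ " " ++ PySem.Str.strip kv.2))
          (value.filter (fun kv => PySem.Str.strip kv.1 != "" || PySem.Str.strip kv.2 != ""))).map String.toList
      = ((value.map pvCtok).filter (fun ts => decide (ts ≠ []))).map (PySem.Chars.join [' ']) := by
    rw [List.filter_map, List.map_map, List.map_map]
    rw [List.filter_congr (q := (fun ts => decide (ts ≠ [])) ∘ pvCtok)
      (fun kv _ => by
        by_cases h1 : PySem.Chars.strip kv.1.toList = [] <;>
          by_cases h2 : PySem.Chars.strip kv.2.toList = [] <;>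
          simp [pvCtok, pv_bne_empty, h1, h2])]
    apply List.map_congr_left
    intro kv hkv
    have hp := (List.mem_filter.mp hkv).2
    have hne : ¬(PySem.Chars.strip kv.1.toList = [] ∧ PySem.Chars.strip kv.2.toList = []) := by
      intro ⟨h1, h2⟩
      simp [Function.comp, pvCtok, h1, h2] at hp
    have := pv_item kv.1.toList kv.2.toList hne
    simp only [Function.comp_apply, String.toList_append, PySem.Str.toList_strip]
    have hsep : (" " : String).toList = [' '] := rfl
    rw [hsep]
    exact this.trans (by rfl)
  rw [List.map_map] at hA
  rw [show ((" " : String).toList) = [' '] from rfl, List.map_map, hA, pv_join_filter_flatten]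
  apply pv_strip_join
  intro q hq
  obtain ⟨ts, hts, hqts⟩ := List.mem_flatten.mp hq
  obtain ⟨kv, _, rfl⟩ := List.mem_map.mp hts
  obtain ⟨hmem, hqne⟩ := List.mem_filter.mp hqts
  have hqne' : q ≠ [] := by simpa using hqne
  have : q = PySem.Chars.strip kv.1.toList ∨ q = PySem.Chars.strip kv.2.toList := by
    simpa using hmem
  refine ⟨hqne', ?_, ?_⟩ <;> rcases this with h | h <;> rw [h]
  · exact pv_headOk_strip _
  · exact pv_headOk_strip _
  · exact pv_lastOk_strip _
  · exact pv_lastOk_strip _
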